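-- pv_equiv track=rewrite | github.com/Daft396/Dictionary-Challenges | Dictionary challenges.py | pop_and_create_new
-- ===== SOURCE A (Python) =====
-- def pop_and_create_new(data, values):
--      newdict = {}
--      for item in data:
--          if item in values:
--              newdict[item] = data.get(item)
--
--      for item in values:
--           if item in data:
--               data.pop(item)
--
--      return newdict
-- ===== SOURCE B (Python) =====
-- def pop_and_create_new(data, values):
--     newdict = {}
--     for item in list(data):
--         if item in values:
--             newdict[item] = data.pop(item)
--     return newdict
-- ===== Notes on version B (the rewrite author's own statement) =====
-- stated objective: simpler
-- what changed: A's two passes (copy the shared keys out of data, then a second loop over values popping them from data) are fused into one pass over a snapshot of data's keys that uses dict.pop to copy and remove each shared key at once.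
import Mathlib
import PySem

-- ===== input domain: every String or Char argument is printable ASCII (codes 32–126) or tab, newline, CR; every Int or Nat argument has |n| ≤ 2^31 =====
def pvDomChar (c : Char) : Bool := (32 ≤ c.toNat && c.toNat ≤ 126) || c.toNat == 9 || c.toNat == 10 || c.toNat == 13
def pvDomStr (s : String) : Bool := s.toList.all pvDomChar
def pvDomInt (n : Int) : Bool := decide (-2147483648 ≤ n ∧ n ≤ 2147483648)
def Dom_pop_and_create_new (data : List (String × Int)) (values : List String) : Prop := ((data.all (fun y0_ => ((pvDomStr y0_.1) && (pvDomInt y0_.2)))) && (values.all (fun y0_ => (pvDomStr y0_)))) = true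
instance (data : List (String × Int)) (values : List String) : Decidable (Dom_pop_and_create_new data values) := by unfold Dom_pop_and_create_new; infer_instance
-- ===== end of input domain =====

-- B fuses A's two passes (copy the shared keys, then pop them) into ONE pass over the
-- keys of `data` using dict.pop; objective: simpler.  Both A and B mutate `data` in
-- place identically (checked in Python); the theorems here are about the RETURN value.

-- ===== PORT A =====
-- A's first loop: over the keys of the dict `data`, copy shared keys with data.get;
-- the second loop pops shared keys out of `data` — a mutation A never returns, kept
-- as the unused `_data1`.
def pop_and_create_new (data : List (String × Int)) (values : List String) : List (String × Int) :=
  let d0 : PySem.Dict String Int := PySem.Dict.update PySem.Dict.empty data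
  let newdict : PySem.Dict String Int :=
    d0.keys.foldl (fun nd item =>
      if values.contains item then nd.insert item (d0.getD item 0) else nd)  -- data.get(item); item is a key of data, so this is its value
      PySem.Dict.empty
  let _data1 : PySem.Dict String Int :=
    values.foldl (fun d item => if d.contains item then d.erase item else d) d0
  newdict.items

-- ===== PORT B =====
-- one pass over list(data) (key snapshot), carrying the pair (newdict, data);
-- data.pop(item) = read the value, then erase the key.
def pop_and_create_new_alt (data : List (String × Int)) (values : List String) : List (String × Int) :=
  let d0 : PySem.Dict String Int := PySem.Dict.update PySem.Dict.empty data
  let st :=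
    d0.keys.foldl (fun (p : PySem.Dict String Int × PySem.Dict String Int) item =>
      if values.contains item then (p.1.insert item (p.2.getD item 0), p.2.erase item) else p)
      (PySem.Dict.empty, d0)
  st.1.items

-- ===== PRECONDITION & SPEC =====
def Spec_pop_and_create_new (data : List (String × Int)) (values : List String) (out : List (String × Int)) : Prop := out = pop_and_create_new_alt data values
instance (data : List (String × Int)) (values : List String) (out : List (String × Int)) : Decidable (Spec_pop_and_create_new data values out) := by unfold Spec_pop_and_create_new; infer_instance

-- ===== CLAIM (what is proved, stated in full; the proofs are below) =====
def Claim_equal_pop_and_create_new : Prop := ∀ (data : List (String × Int)) (values : List String), Dom_pop_and_create_new data values → Spec_pop_and_create_new data values (pop_and_create_new data values)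

-- ===== LEMMAS AND PROOFS =====

-- erasing one key leaves every other lookup unchanged
theorem find?_filter_ne (k j : String) (h : j ≠ k) :
    ∀ l : List (String × Int),
      List.find? (fun p => p.1 == j) (l.filter (fun p => !(p.1 == k)))
      = List.find? (fun p => p.1 == j) l := by
  intro l
  induction l with
  | nil => rfl
  | cons p l ih =>
      by_cases hp : p.1 = k
      · have hkj : (k == j) = false := beq_eq_false_iff_ne.mpr (Ne.symm h)
        simp [hp, hkj, ih]
      · by_cases hj : p.1 = j
        · simp [hj, h]
        · simp [hp, hj, ih]

theorem getD_erase_of_ne {d : PySem.Dict String Int} {k j : String} (h : j ≠ k) :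
    (d.erase k).getD j 0 = d.getD j 0 := by
  obtain ⟨l⟩ := d
  simp only [PySem.Dict.getD, PySem.Dict.get?, PySem.Dict.erase]
  rw [find?_filter_ne k j h l]

-- B's fused loop computes the same newdict as A's first loop, as long as the
-- shrinking dict still agrees with d' on every key not yet processed.
theorem fold_pair_fst (values : List String) :
    ∀ (l : List String) (nd : PySem.Dict String Int) (d d' : PySem.Dict String Int),
      (∀ k ∈ l, d.getD k 0 = d'.getD k 0) → l.Nodup →
      (l.foldl (fun (p : PySem.Dict String Int × PySem.Dict String Int) item =>
          if values.contains item then (p.1.insert item (p.2.getD item 0), p.2.erase item) else p)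
        (nd, d)).1
      = l.foldl (fun nd item =>
          if values.contains item then nd.insert item (d'.getD item 0) else nd) nd := by
  intro l
  induction l with
  | nil => intro nd d d' _ _; rfl
  | cons k l ih =>
      intro nd d d' hagree hnodup
      have hk : d.getD k 0 = d'.getD k 0 := hagree k (by simp)
      have htail : ∀ j ∈ l, (d.erase k).getD j 0 = d'.getD j 0 := by
        intro j hj
        have hne : j ≠ k := by
          rintro rfl; exact (List.nodup_cons.mp hnodup).1 hj
        rw [getD_erase_of_ne hne]; exact hagree j (by simp [hj])
      by_cases hc : values.contains k
      · simp only [List.foldl_cons, hc, if_true, hk]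
        exact ih (nd.insert k (d'.getD k 0)) (d.erase k) d' htail (List.nodup_cons.mp hnodup).2
      · simp only [List.foldl_cons, hc, Bool.false_eq_true, if_false]
        exact ih nd d d' (fun j hj => hagree j (List.mem_cons_of_mem _ hj)) (List.nodup_cons.mp hnodup).2

-- ===== VERDICT (by name: the statement is the Claim_ definition above) =====
theorem pop_and_create_new_spec : Claim_equal_pop_and_create_new := by
  intro data values _
  unfold Spec_pop_and_create_new pop_and_create_new pop_and_create_new_alt
  have h := fold_pair_fst values (PySem.Dict.update PySem.Dict.empty data).keys
    PySem.Dict.empty (PySem.Dict.update PySem.Dict.empty data) (PySem.Dict.update PySem.Dict.empty data)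
    (fun _ _ => rfl) (PySem.Dict.nodup_keys_update _ _ PySem.Dict.nodup_keys_empty)
  simp only [h]
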